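-- pv_equiv track=rewrite | github.com/bansalshubham257/option-chain-python | intraday_monitor_large_lots.py | filter_strikes
-- ===== SOURCE A (Python) =====
-- def filter_strikes(option_chain):
--     """Select ATM, top 3 ITM, and top 3 OTM strikes."""
--     strike_prices = sorted(set([opt["strike_price"] for opt in option_chain]))
--
--     if not strike_prices:
--         return []
--
--     atm_strike = min(strike_prices, key=lambda x: abs(x - option_chain[0]["underlying_spot_price"]))
--     atm_index = strike_prices.index(atm_strike)
--
--     # Get ITM (lower strikes for calls, higher strikes for puts)
--     itm_strikes = strike_prices[max(0, atm_index - 3):atm_index]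
--
--     # Get OTM (higher strikes for calls, lower strikes for puts)
--     otm_strikes = strike_prices[atm_index + 1: atm_index + 4]
--
--     return itm_strikes + [atm_strike] + otm_strikes  # Return sorted selection
-- ===== SOURCE B (Python) =====
-- def filter_strikes(option_chain):
--     """Select ATM, top 3 ITM, and top 3 OTM strikes."""
--     unique = set(opt["strike_price"] for opt in option_chain)
--
--     if not unique:
--         return []
--
--     spot = option_chain[0]["underlying_spot_price"]
--     # lexicographic key: nearest to spot, ties broken by the lower strike
--     atm = min(unique, key=lambda s: (abs(s - spot), s))
--
--     itm = sorted(s for s in unique if s < atm)[-3:]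
--     otm = sorted(s for s in unique if s > atm)[:3]
--     return itm + [atm] + otm
-- ===== Notes on version B (the rewrite author's own statement) =====
-- stated objective: alternative
-- what changed: Instead of sorting the whole deduplicated strike list and slicing around the ATM index, B finds the ATM strike by a single lexicographic min (distance to spot, then lower strike), partitions the unique strikes around it, and sorts only the two sides, taking three from each end.
import Mathlib
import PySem

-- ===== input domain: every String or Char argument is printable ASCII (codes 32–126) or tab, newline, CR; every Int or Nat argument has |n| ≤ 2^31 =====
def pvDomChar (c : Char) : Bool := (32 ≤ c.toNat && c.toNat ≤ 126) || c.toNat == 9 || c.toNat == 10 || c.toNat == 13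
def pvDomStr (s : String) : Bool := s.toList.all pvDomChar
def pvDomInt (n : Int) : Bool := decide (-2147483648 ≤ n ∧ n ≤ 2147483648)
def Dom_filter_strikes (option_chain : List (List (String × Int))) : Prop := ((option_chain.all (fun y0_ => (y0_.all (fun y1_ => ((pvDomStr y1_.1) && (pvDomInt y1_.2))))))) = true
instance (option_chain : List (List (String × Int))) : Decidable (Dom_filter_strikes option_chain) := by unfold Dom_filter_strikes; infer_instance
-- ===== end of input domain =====

-- B replaces A's full sort + index + positional slices by: a lexicographic min (distance to spot, then lower
-- strike) to find the ATM strike without sorting, then partitioning the unique strikes around it and sorting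
-- only the two sides, taking three from each end (objective: alternative decomposition, not claimed faster).

-- ===== PORT A =====
def filter_strikes (option_chain : List (List (String × Int))) : List Int :=
  let strike_prices := PySem.List.sorted
    (PySem.Set.ofList (option_chain.map (fun opt => ((PySem.Dict.mk opt).get? "strike_price").getD 0)))
    (fun x => x) false
  if strike_prices = [] then []
  else
    let spot := ((PySem.Dict.mk (PySem.List.pyGetD option_chain 0 [])).get? "underlying_spot_price").getD 0
    let atm_strike := (PySem.List.min? strike_prices (fun x => |x - spot|)).getD 0
    let atm_index := (PySem.List.index? strike_prices atm_strike).getD 0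
    let itm_strikes := PySem.List.slice strike_prices (some (max 0 ((atm_index : Int) - 3))) (some (atm_index : Int))
    let otm_strikes := PySem.List.slice strike_prices (some ((atm_index : Int) + 1)) (some ((atm_index : Int) + 4))
    itm_strikes ++ [atm_strike] ++ otm_strikes

-- ===== PORT B =====
def filter_strikes_alt (option_chain : List (List (String × Int))) : List Int :=
  let unique := PySem.Set.ofList (option_chain.map (fun opt => ((PySem.Dict.mk opt).get? "strike_price").getD 0))
  if unique = [] then []
  else
    let spot := ((PySem.Dict.mk (PySem.List.pyGetD option_chain 0 [])).get? "underlying_spot_price").getD 0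
    let atm := (PySem.List.min2? unique (fun s => |s - spot|) (fun s => s)).getD 0
    let itm := PySem.List.slice (PySem.List.sorted (unique.filter (fun s => decide (s < atm))) (fun x => x) false) (some (-3)) none
    let otm := PySem.List.slice (PySem.List.sorted (unique.filter (fun s => decide (atm < s))) (fun x => x) false) none (some 3)
    itm ++ [atm] ++ otm

-- ===== PRECONDITION & SPEC =====
-- Pre_ excludes exactly the inputs where Python A raises KeyError: an option row without a
-- "strike_price" key, or (when the chain is nonempty) a first row without "underlying_spot_price".
def Pre_filter_strikes (option_chain : List (List (String × Int))) : Prop :=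
  (∀ opt ∈ option_chain, (PySem.Dict.mk opt).contains "strike_price" = true) ∧
  (option_chain ≠ [] → (PySem.Dict.mk (option_chain.headD [])).contains "underlying_spot_price" = true)
instance (option_chain : List (List (String × Int))) : Decidable (Pre_filter_strikes option_chain) := by
  unfold Pre_filter_strikes; infer_instance

def pvWitness_filter_strikes : (List (List (String × Int))) :=
  [[("strike_price", 100), ("underlying_spot_price", 103)], [("strike_price", 105), ("underlying_spot_price", 103)]]

def Spec_filter_strikes (option_chain : List (List (String × Int))) (out : List Int) : Prop := out = filter_strikes_alt option_chain
instance (option_chain : List (List (String × Int))) (out : List Int) : Decidable (Spec_filter_strikes option_chain out) := by unfold Spec_filter_strikes; infer_instance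

-- ===== CLAIM (what is proved, stated in full; the proofs are below) =====
def Claim_equal_filter_strikes : Prop := ∀ (option_chain : List (List (String × Int))), Dom_filter_strikes option_chain → Pre_filter_strikes option_chain → Spec_filter_strikes option_chain (filter_strikes option_chain)

-- ===== LEMMAS AND PROOFS =====

-- A's `min(key=abs-distance)` takes the FIRST minimiser; on a strictly increasing list that is the
-- lexicographic minimum by (distance, value).
theorem pv_min_fold_incr (k : Int → Int) :
    ∀ (t : List Int) (a m : Int), t.Pairwise (· < ·) → (∀ y ∈ t, a < y) →
      t.foldl (fun acc x => match acc with
        | none => some x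
        | some m => if k x < k m then some x else some m) (some a) = some m →
      (m = a ∨ m ∈ t) ∧ (k m < k a ∨ (k m = k a ∧ m ≤ a)) ∧
        (∀ y ∈ t, k m < k y ∨ (k m = k y ∧ m ≤ y)) := by
  intro t
  induction t with
  | nil =>
      intro a m _ _ h
      simp only [List.foldl, Option.some.injEq] at h
      subst h
      exact ⟨Or.inl rfl, Or.inr ⟨rfl, le_refl _⟩, by simp⟩
  | cons x t ih =>
      intro a m hpw hlt h
      simp only [List.foldl] at h
      rcases List.pairwise_cons.mp hpw with ⟨hxlt, hpw'⟩
      by_cases hk : k x < k a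
      · simp only [hk, if_pos] at h
        obtain ⟨hmem, hma, hall⟩ := ih x m hpw' (fun y hy => hxlt y hy) h
        refine ⟨Or.inr (by rcases hmem with h1 | h1 <;> simp [h1]), ?_, ?_⟩
        · rcases hma with h1 | ⟨h1, _⟩ <;> omega
        · intro y hy
          rcases List.mem_cons.mp hy with rfl | hy
          · rcases hma with h1 | ⟨h1, h2⟩ <;> omega
          · exact hall y hy
      · simp only [hk, if_false] at h
        obtain ⟨hmem, hma, hall⟩ := ih a m hpw' (fun y hy => hlt y (List.mem_cons_of_mem _ hy)) h
        refine ⟨?_, hma, ?_⟩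
        · rcases hmem with h1 | h1
          · exact Or.inl h1
          · exact Or.inr (List.mem_cons_of_mem _ h1)
        · intro y hy
          rcases List.mem_cons.mp hy with rfl | hy
          · have hax : a < y := hlt y (List.mem_cons_self)
            rcases hma with h1 | ⟨h1, h2⟩ <;> omega
          · exact hall y hy

theorem pv_min?_incr (k : Int → Int) (L : List Int) (m : Int)
    (hpw : L.Pairwise (· < ·)) (h : PySem.List.min? L k = some m) :
    m ∈ L ∧ ∀ y ∈ L, k m < k y ∨ (k m = k y ∧ m ≤ y) := by
  cases L with
  | nil => simp [PySem.List.min?, List.foldl] at h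
  | cons x t =>
      have h' : t.foldl (fun acc x => match acc with
        | none => some x
        | some m => if k x < k m then some x else some m) (some x) = some m := by
        unfold PySem.List.min? at h
        simp only [List.foldl] at h
        convert h using 2
        funext acc y
        cases acc <;> rfl
      rcases List.pairwise_cons.mp hpw with ⟨hxlt, hpw'⟩
      obtain ⟨hmem, hma, hall⟩ := pv_min_fold_incr k t x m hpw' hxlt h'
      refine ⟨?_, ?_⟩
      · rcases hmem with h1 | h1
        · simp [h1]
        · exact List.mem_cons_of_mem _ h1
      · intro y hy
        rcases List.mem_cons.mp hy with rfl | hy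
        · exact hma
        · exact hall y hy

-- B's `min(key=(abs-distance, value))` over any list is a lexicographic lower bound of all elements.
theorem pv_min2_fold (k : Int → Int) :
    ∀ (t : List Int) (a m : Int),
      t.foldl (fun acc x => match acc with
        | none => some x
        | some m => if (decide (k x < k m) || (!decide (k m < k x) && decide (x < m))) = true
                    then some x else some m) (some a) = some m →
      (m = a ∨ m ∈ t) ∧ (k m < k a ∨ (k m = k a ∧ m ≤ a)) ∧
        (∀ y ∈ t, k m < k y ∨ (k m = k y ∧ m ≤ y)) := by
  intro t
  induction t with
  | nil =>
      intro a m h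
      simp only [List.foldl, Option.some.injEq] at h
      subst h
      exact ⟨Or.inl rfl, Or.inr ⟨rfl, le_refl _⟩, by simp⟩
  | cons x t ih =>
      intro a m h
      simp only [List.foldl] at h
      by_cases hc : (decide (k x < k a) || (!decide (k a < k x) && decide (x < a))) = true
      · rw [if_pos hc] at h
        obtain ⟨hmem, hma, hall⟩ := ih x m h
        simp only [Bool.or_eq_true, Bool.and_eq_true, Bool.not_eq_true', decide_eq_true_eq,
          decide_eq_false_iff_not] at hc
        refine ⟨Or.inr (by rcases hmem with h1 | h1 <;> simp [h1]), ?_, ?_⟩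
        · rcases hma with h1 | ⟨h1, h2⟩ <;> rcases hc with h3 | ⟨h3, h4⟩ <;> omega
        · intro y hy
          rcases List.mem_cons.mp hy with rfl | hy
          · rcases hma with h1 | ⟨h1, h2⟩ <;> omega
          · exact hall y hy
      · rw [if_neg hc] at h
        obtain ⟨hmem, hma, hall⟩ := ih a m h
        simp only [Bool.or_eq_true, Bool.and_eq_true, Bool.not_eq_true', decide_eq_true_eq,
          decide_eq_false_iff_not, not_or, not_and] at hc
        refine ⟨?_, hma, ?_⟩
        · rcases hmem with h1 | h1
          · exact Or.inl h1
          · exact Or.inr (List.mem_cons_of_mem _ h1)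
        · intro y hy
          rcases List.mem_cons.mp hy with rfl | hy
          · obtain ⟨h3, h4⟩ := hc
            by_cases h5 : k a < k y
            · rcases hma with h1 | ⟨h1, h2⟩ <;> omega
            · have h6 := h4 h5
              rcases hma with h1 | ⟨h1, h2⟩ <;> omega
          · exact hall y hy

theorem pv_min2_fold_isSome (k : Int → Int) :
    ∀ (t : List Int) (a : Int),
      (t.foldl (fun acc x => match acc with
        | none => some x
        | some m => if (decide (k x < k m) || (!decide (k m < k x) && decide (x < m))) = true
                    then some x else some m) (some a)).isSome = true := by
  intro t
  induction t with
  | nil => intro a; rfl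
  | cons x t ih =>
      intro a
      simp only [List.foldl]
      by_cases hc : (decide (k x < k a) || (!decide (k a < k x) && decide (x < a))) = true
      · rw [if_pos hc]; exact ih x
      · rw [if_neg hc]; exact ih a

theorem pv_min2?_isSome (k : Int → Int) (x : Int) (t : List Int) :
    ∃ m, PySem.List.min2? (x :: t) k (fun s => s) = some m := by
  cases h : PySem.List.min2? (x :: t) k (fun s => s) with
  | some m => exact ⟨m, rfl⟩
  | none =>
      exfalso
      have h' : t.foldl (fun acc x => match acc with
        | none => some x
        | some m => if (decide (k x < k m) || (!decide (k m < k x) && decide (x < m))) = true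
                    then some x else some m) (some x) = none := by
        unfold PySem.List.min2? at h
        simp only [List.foldl] at h
        convert h using 2
        funext acc y
        cases acc <;> rfl
      have h2 := pv_min2_fold_isSome k t x
      rw [h'] at h2
      simp at h2

theorem pv_min2?_spec (k : Int → Int) (xs : List Int) (m : Int)
    (h : PySem.List.min2? xs k (fun s => s) = some m) :
    m ∈ xs ∧ ∀ y ∈ xs, k m < k y ∨ (k m = k y ∧ m ≤ y) := by
  cases xs with
  | nil => simp [PySem.List.min2?, List.foldl] at h
  | cons x t =>
      have h' : t.foldl (fun acc x => match acc with
        | none => some x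
        | some m => if (decide (k x < k m) || (!decide (k m < k x) && decide (x < m))) = true
                    then some x else some m) (some x) = some m := by
        unfold PySem.List.min2? at h
        simp only [List.foldl] at h
        convert h using 2
        funext acc y
        cases acc <;> rfl
      obtain ⟨hmem, hma, hall⟩ := pv_min2_fold k t x m h'
      refine ⟨?_, ?_⟩
      · rcases hmem with h1 | h1
        · simp [h1]
        · exact List.mem_cons_of_mem _ h1
      · intro y hy
        rcases List.mem_cons.mp hy with rfl | hy
        · exact hma
        · exact hall y hy

-- ===== VERDICT (by name: the statement is the Claim_ definition above) =====
theorem filter_strikes_spec : Claim_equal_filter_strikes := by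
  intro oc _ _
  unfold Spec_filter_strikes filter_strikes filter_strikes_alt
  set f : List (String × Int) → Int := fun opt => ((PySem.Dict.mk opt).get? "strike_price").getD 0 with hf
  set S : List Int := PySem.Set.ofList (oc.map f) with hS
  set L : List Int := PySem.List.sorted S (fun x => x) false with hL
  by_cases hSnil : S = []
  · have hLnil2 : L = [] := by
      rw [hL, hSnil]; exact (PySem.List.sorted_eq_nil_iff _ _ _).mpr rfl
    rw [if_pos hLnil2, if_pos hSnil]
  · have hLnil : L ≠ [] := by
      rw [hL]; intro h; exact hSnil ((PySem.List.sorted_eq_nil_iff _ _ _).mp h)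
    simp only [if_neg hSnil, if_neg hLnil]
    set spot : Int := ((PySem.Dict.mk (PySem.List.pyGetD oc 0 [])).get? "underlying_spot_price").getD 0 with hspot
    set k : Int → Int := fun x => |x - spot| with hk
    have hpw : L.Pairwise (· < ·) := by rw [hL, hS]; exact PySem.List.sorted_ofList_pairwise_lt _
    -- the two ATM strikes coincide
    obtain ⟨mA, hmA⟩ : ∃ m, PySem.List.min? L k = some m := by
      cases h : PySem.List.min? L k with
      | none => exact absurd ((PySem.List.min?_eq_none_iff _ _).mp h) hLnil
      | some m => exact ⟨m, rfl⟩
    obtain ⟨mB, hmB⟩ : ∃ m, PySem.List.min2? S k (fun s => s) = some m := by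
      rcases List.exists_cons_of_ne_nil hSnil with ⟨x, t, hxt⟩
      rw [hxt]
      exact pv_min2?_isSome k x t
    obtain ⟨hmAmem, hmAmin⟩ := pv_min?_incr k L mA hpw hmA
    obtain ⟨hmBmem, hmBmin⟩ := pv_min2?_spec k S mB hmB
    have hmemLS : ∀ x : Int, x ∈ L ↔ x ∈ S := by
      intro x; rw [hL]; exact PySem.List.mem_sorted _ _ _ _
    have hAB : mA = mB := by
      have h1 := hmAmin mB ((hmemLS mB).mpr hmBmem)
      have h2 := hmBmin mA ((hmemLS mA).mp hmAmem)
      omega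
    have hgdA : (PySem.List.min? L k).getD 0 = mA := by rw [hmA]; rfl
    have hgdB : (PySem.List.min2? S k (fun s => s)).getD 0 = mA := by rw [hmB, ← hAB]; rfl
    rw [hgdA, hgdB]
    -- decompose L around the ATM index
    obtain ⟨i, hidx⟩ : ∃ i, PySem.List.index? L mA = some i := by
      cases h : PySem.List.index? L mA with
      | none => exact absurd ((PySem.List.index?_eq_none_iff _ _).mp h) (by simp [hmAmem])
      | some i => exact ⟨i, rfl⟩
    obtain ⟨pre, suf, hLeq, hlen, _⟩ := (PySem.List.index?_eq_some_iff L mA i).mp hidx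
    rw [hidx, Option.getD_some]
    have hpw' := hLeq ▸ hpw
    rcases List.pairwise_append.mp hpw' with ⟨hpre, hsuf, hcross⟩
    have hpre_lt : ∀ a ∈ pre, a < mA := fun a ha => hcross a ha mA List.mem_cons_self
    have hsuf_gt : ∀ b ∈ suf, mA < b := fun b hb => (List.pairwise_cons.mp hsuf).1 b hb
    -- the filtered sides are exactly pre and suf
    have hfb : L.filter (fun s => decide (s < mA)) = pre := by
      rw [hLeq, List.filter_append, List.filter_eq_self.mpr (fun a ha => by simp [hpre_lt a ha]),
        List.filter_cons]
      simp only [decide_eq_true_eq, lt_irrefl, if_false]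
      rw [List.filter_eq_nil_iff.mpr (fun b hb => by simp; exact le_of_lt (hsuf_gt b hb))]
      simp
    have hfa : L.filter (fun s => decide (mA < s)) = suf := by
      rw [hLeq, List.filter_append, List.filter_eq_nil_iff.mpr
        (fun a ha => by simp; exact le_of_lt (hpre_lt a ha)), List.filter_cons]
      simp only [decide_eq_true_eq, lt_irrefl, if_false]
      rw [List.filter_eq_self.mpr (fun b hb => by simp [hsuf_gt b hb])]
      simp
    have hperm : L.Perm S := by rw [hL]; exact PySem.List.sorted_perm _ _ _
    have hsortb : PySem.List.sorted (S.filter (fun s => decide (s < mA))) (fun x => x) false = pre := by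
      apply PySem.List.sorted_eq_of_perm_of_pairwise_lt
      · rw [← hfb]; exact hperm.filter _
      · exact hpre
    have hsorta : PySem.List.sorted (S.filter (fun s => decide (mA < s))) (fun x => x) false = suf := by
      apply PySem.List.sorted_eq_of_perm_of_pairwise_lt
      · rw [← hfa]; exact hperm.filter _
      · exact (List.pairwise_cons.mp hsuf).2
    rw [hsortb, hsorta]
    -- ITM side: L[max(0,i-3):i] = pre[-3:]
    have hmax : max 0 ((i : Int) - 3) = ((i - 3 : Nat) : Int) := by omega
    have hitm : PySem.List.slice L (some (max 0 ((i : Int) - 3))) (some (i : Int)) =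
        PySem.List.slice pre (some (-3)) none := by
      rw [hmax, PySem.List.slice_natCast, PySem.List.slice_from_neg_ofNat pre 3 (by omega), hlen]
      rw [hLeq, List.drop_append_of_le_length (by omega)]
      have hlen' : (pre.drop (i - 3)).length = i - (i - 3) := by rw [List.length_drop]; omega
      rw [← hlen', List.take_append, List.take_length, Nat.sub_self, List.take_zero,
        List.append_nil]
    -- OTM side: L[i+1:i+4] = suf[:3]
    have hotm : PySem.List.slice L (some ((i : Int) + 1)) (some ((i : Int) + 4)) =
        PySem.List.slice suf none (some 3) := by
      have h1 : ((i : Int) + 1) = ((i + 1 : Nat) : Int) := by push_cast; ring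
      have h4 : ((i : Int) + 4) = ((i + 4 : Nat) : Int) := by push_cast; ring
      rw [h1, h4, PySem.List.slice_natCast, PySem.List.slice_to suf (by omega)]
      have : i + 4 - (i + 1) = 3 := by omega
      rw [this, hLeq]
      have hdrop : (pre ++ mA :: suf).drop (i + 1) = suf := by
        have : i + 1 = pre.length + 1 := by omega
        rw [this, List.drop_append]
        simp
      rw [hdrop]
      rfl
    rw [hitm, hotm]
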